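-- pv_equiv track=rewrite | github.com/Apros7/GrammatikTAK | Old_Modules/nutids_r.py | find_subject
-- ===== SOURCE A (Python) =====
-- def find_subject(word_classes):
--     new_pos = word_classes[:]
--     for i in range(len(word_classes)):
--         if word_classes[i] == "NOUN":
--             new_pos[i] = "SBJ"
--             if i >= len(word_classes)-1:
--                 continue
--             if word_classes[i+1] == "CCONJ":
--                 new_pos[i+1] = "SBJ"
--     return new_pos
-- ===== SOURCE B (Python) =====
-- def find_subject(word_classes):
--     new_pos = []
--     prev_noun = False
--     for w in word_classes:
--         if w == "NOUN":
--             new_pos.append("SBJ")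
--             prev_noun = True
--         elif w == "CCONJ" and prev_noun:
--             new_pos.append("SBJ")
--             prev_noun = False
--         else:
--             new_pos.append(w)
--             prev_noun = False
--     return new_pos
-- ===== Notes on version B (the rewrite author's own statement) =====
-- stated objective: simpler
-- what changed: Replaces A's index-based loop over a mutated copy with look-ahead writes to the next cell by a single forward pass that builds the output list with a look-back prev-was-noun flag.
import Mathlib
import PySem

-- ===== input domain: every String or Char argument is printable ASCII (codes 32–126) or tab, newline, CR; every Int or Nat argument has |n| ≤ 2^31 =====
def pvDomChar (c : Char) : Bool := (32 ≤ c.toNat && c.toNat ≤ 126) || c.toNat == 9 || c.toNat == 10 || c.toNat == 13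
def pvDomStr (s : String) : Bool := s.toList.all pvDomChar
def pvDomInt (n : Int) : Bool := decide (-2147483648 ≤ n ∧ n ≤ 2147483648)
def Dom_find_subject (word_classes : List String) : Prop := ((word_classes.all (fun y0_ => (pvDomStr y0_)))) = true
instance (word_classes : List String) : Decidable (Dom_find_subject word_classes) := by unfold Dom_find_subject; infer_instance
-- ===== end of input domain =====

-- B builds the output in one forward pass with a look-back "previous was NOUN" flag instead of A's indexed writes into a mutated copy; return-value equivalence is proved (A mutates only its local copy).


-- ===== PORT A =====
-- one iteration of A's for-loop body (new_pos is the accumulator, word_classes is read-only)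
def stepA (wc : List String) (np : List String) (i : Nat) : List String :=
  if wc.getD i "" = "NOUN" then
    let np1 := np.set i "SBJ"
    if wc.length - 1 ≤ i then np1
    else if wc.getD (i+1) "" = "CCONJ" then np1.set (i+1) "SBJ" else np1
  else np

def find_subject (word_classes : List String) : List String :=
  (List.range word_classes.length).foldl (stepA word_classes) word_classes

-- ===== PORT B =====
-- B's forward pass: current word + the "previous word was NOUN" flag decide the output cell
def goB : List String → Bool → List String
  | [], _ => []
  | w :: ws, prev =>
    if w = "NOUN" then "SBJ" :: goB ws true
    else if w = "CCONJ" ∧ prev = true then "SBJ" :: goB ws false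
    else w :: goB ws false

def find_subject_alt (word_classes : List String) : List String :=
  goB word_classes false

-- ===== PRECONDITION & SPEC =====
def Spec_find_subject (word_classes : List String) (out : List String) : Prop := out = find_subject_alt word_classes
instance (word_classes : List String) (out : List String) : Decidable (Spec_find_subject word_classes out) := by unfold Spec_find_subject; infer_instance

-- ===== CLAIM (what is proved, stated in full; the proofs are below) =====
def Claim_equal_find_subject : Prop := ∀ (word_classes : List String), Dom_find_subject word_classes → Spec_find_subject word_classes (find_subject word_classes)

-- ===== LEMMAS AND PROOFS =====

theorem lt_of_some {l : List String} {i : Nat} {a : String} (h : l[i]? = some a) :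
    i < l.length := by
  by_contra hge
  rw [List.getElem?_eq_none_iff.2 (by omega)] at h
  cases h

theorem stepA_length (wc np : List String) (i : Nat) : (stepA wc np i).length = np.length := by
  unfold stepA; split_ifs <;> simp

theorem foldlA_length (wc : List String) (l : List Nat) (np : List String) :
    (l.foldl (stepA wc) np).length = np.length := by
  induction l generalizing np with
  | nil => rfl
  | cons i t ih => simpa [List.foldl, stepA_length] using ih (stepA wc np i)

-- positions A has marked "SBJ" after processing the first n indices
theorem A_inv (wc : List String) : ∀ n, n ≤ wc.length → ∀ j,
    ((List.range n).foldl (stepA wc) wc)[j]? =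
      if (wc[j]? = some "NOUN" ∧ j < n) ∨
         (wc[j]? = some "CCONJ" ∧ 1 ≤ j ∧ wc[j-1]? = some "NOUN" ∧ j - 1 < n)
      then some "SBJ" else wc[j]? := by
  intro n
  induction n with
  | zero =>
    intro _ j
    simp
  | succ n ih =>
    intro hn j
    have hn' : n ≤ wc.length := Nat.le_of_succ_le hn
    have hnlt : n < wc.length := Nat.lt_of_succ_le hn
    have hlen : ((List.range n).foldl (stepA wc) wc).length = wc.length := foldlA_length wc _ wc
    have hstep : ((List.range (n+1)).foldl (stepA wc) wc) =
        stepA wc ((List.range n).foldl (stepA wc) wc) n := by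
      rw [List.range_succ, List.foldl_append]; rfl
    rw [hstep]
    set P := (List.range n).foldl (stepA wc) wc with hP
    have hPj := ih hn' j
    unfold stepA
    by_cases hN : wc.getD n "" = "NOUN"
    · have hNs : wc[n]? = some "NOUN" := by
        have h := List.getElem?_eq_getElem hnlt
        rw [List.getD_eq_getElem?_getD, h] at hN
        simp at hN
        rw [h, hN]
      rw [if_pos hN]
      by_cases hlast : wc.length - 1 ≤ n
      · -- n is the last index
        rw [if_pos hlast, List.getElem?_set]
        by_cases hj : j = n
        · subst hj
          rw [if_pos rfl, if_pos (show j < P.length by rw [hlen]; exact hnlt),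
            if_pos (Or.inl ⟨hNs, Nat.lt_succ_self j⟩)]
        · rw [if_neg (fun h => hj h.symm), hPj]
          congr 1
          simp only [eq_iff_iff]
          constructor
          · rintro (⟨h1,h2⟩|⟨h1,h2,h3,h4⟩)
            · exact Or.inl ⟨h1, by omega⟩
            · exact Or.inr ⟨h1, h2, h3, by omega⟩
          · rintro (⟨h1,h2⟩|⟨h1,h2,h3,h4⟩)
            · exact Or.inl ⟨h1, by omega⟩
            · refine Or.inr ⟨h1, h2, h3, ?_⟩
              have hjl := lt_of_some h1
              omega
      · -- n+1 < wc.length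
        have hn1 : n + 1 < wc.length := by omega
        rw [if_neg hlast]
        by_cases hC : wc.getD (n+1) "" = "CCONJ"
        · have hCs : wc[n+1]? = some "CCONJ" := by
            have h := List.getElem?_eq_getElem hn1
            rw [List.getD_eq_getElem?_getD, h] at hC
            simp at hC
            rw [h, hC]
          rw [if_pos hC, List.getElem?_set, List.getElem?_set]
          by_cases hj1 : j = n + 1
          · subst hj1
            rw [if_pos rfl,
              if_pos (show n + 1 < (P.set n "SBJ").length by rw [List.length_set, hlen]; exact hn1),
              if_pos (Or.inr ⟨hCs, by omega, hNs, by omega⟩)]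
          · rw [if_neg (fun h => hj1 h.symm)]
            by_cases hj : j = n
            · subst hj
              rw [if_pos rfl, if_pos (show j < P.length by rw [hlen]; exact hnlt),
                if_pos (Or.inl ⟨hNs, Nat.lt_succ_self j⟩)]
            · rw [if_neg (fun h => hj h.symm), hPj]
              congr 1
              simp only [eq_iff_iff]
              constructor
              · rintro (⟨h1,h2⟩|⟨h1,h2,h3,h4⟩)
                · exact Or.inl ⟨h1, by omega⟩
                · exact Or.inr ⟨h1, h2, h3, by omega⟩
              · rintro (⟨h1,h2⟩|⟨h1,h2,h3,h4⟩)
                · exact Or.inl ⟨h1, by omega⟩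
                · exact Or.inr ⟨h1, h2, h3, by omega⟩
        · have hCn : ¬ wc[n+1]? = some "CCONJ" := by
            intro h
            rw [List.getD_eq_getElem?_getD, h] at hC; simp at hC
          rw [if_neg hC, List.getElem?_set]
          by_cases hj : j = n
          · subst hj
            rw [if_pos rfl, if_pos (show j < P.length by rw [hlen]; exact hnlt),
              if_pos (Or.inl ⟨hNs, Nat.lt_succ_self j⟩)]
          · rw [if_neg (fun h => hj h.symm), hPj]
            congr 1
            simp only [eq_iff_iff]
            constructor
            · rintro (⟨h1,h2⟩|⟨h1,h2,h3,h4⟩)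
              · exact Or.inl ⟨h1, by omega⟩
              · exact Or.inr ⟨h1, h2, h3, by omega⟩
            · rintro (⟨h1,h2⟩|⟨h1,h2,h3,h4⟩)
              · exact Or.inl ⟨h1, by omega⟩
              · refine Or.inr ⟨h1, h2, h3, ?_⟩
                by_cases hj1 : j = n + 1
                · exfalso; rw [hj1] at h1; exact hCn h1
                · omega
    · -- wc[n] ≠ "NOUN"
      have hNn : ¬ wc[n]? = some "NOUN" := by
        intro h; rw [List.getD_eq_getElem?_getD, h] at hN; simp at hN
      rw [if_neg hN, hPj]
      congr 1
      simp only [eq_iff_iff]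
      constructor
      · rintro (⟨h1,h2⟩|⟨h1,h2,h3,h4⟩)
        · exact Or.inl ⟨h1, by omega⟩
        · exact Or.inr ⟨h1, h2, h3, by omega⟩
      · rintro (⟨h1,h2⟩|⟨h1,h2,h3,h4⟩)
        · refine Or.inl ⟨h1, ?_⟩
          by_cases hj : j = n
          · exact absurd (hj ▸ h1) hNn
          · omega
        · refine Or.inr ⟨h1, h2, h3, ?_⟩
          by_cases hj1 : j - 1 = n
          · exact absurd (hj1 ▸ h3) hNn
          · omega

theorem cond_shift (w : String) (t : List String) (b : Bool) (k : Nat)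
    (hb : b = true ↔ w = "NOUN") :
    ((k = 0 ∧ b = true) ∨ (1 ≤ k ∧ t[k-1]? = some "NOUN")) ↔ (w :: t)[k]? = some "NOUN" := by
  cases k with
  | zero => simp [hb]
  | succ m => simp

theorem B_char (ws : List String) : ∀ prev j,
    (goB ws prev)[j]? =
      if (ws[j]? = some "NOUN") ∨
         (ws[j]? = some "CCONJ" ∧ ((j = 0 ∧ prev = true) ∨ (1 ≤ j ∧ ws[j-1]? = some "NOUN")))
      then some "SBJ" else ws[j]? := by
  induction ws with
  | nil => intro prev j; simp [goB]
  | cons w t ih =>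
    intro prev j
    cases j with
    | zero =>
      unfold goB
      split_ifs with h1 h2 <;> simp_all
    | succ k =>
      have main : ∀ b, (b = true ↔ w = "NOUN") →
          (goB t b)[k]? =
            if (t[k]? = some "NOUN") ∨
               (t[k]? = some "CCONJ" ∧
                 ((k + 1 = 0 ∧ prev = true) ∨ (1 ≤ k + 1 ∧ (w :: t)[k]? = some "NOUN")))
            then some "SBJ" else t[k]? := by
        intro b hb
        rw [ih b k]
        congr 1
        simp only [eq_iff_iff]
        rw [cond_shift w t b k hb]
        simp
      by_cases h1 : w = "NOUN"
      · rw [show goB (w :: t) prev = "SBJ" :: goB t true by rw [goB, if_pos h1],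
          List.getElem?_cons_succ]
        exact main true (by simp [h1])
      · by_cases h2 : w = "CCONJ" ∧ prev = true
        · rw [show goB (w :: t) prev = "SBJ" :: goB t false by rw [goB, if_neg h1, if_pos h2],
            List.getElem?_cons_succ]
          exact main false (by simp [h1])
        · rw [show goB (w :: t) prev = w :: goB t false by rw [goB, if_neg h1, if_neg h2],
            List.getElem?_cons_succ]
          exact main false (by simp [h1])

-- ===== VERDICT (by name: the statement is the Claim_ definition above) =====
theorem find_subject_spec : Claim_equal_find_subject := by
  intro wc _
  unfold Spec_find_subject find_subject find_subject_alt
  apply List.ext_getElem?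
  intro j
  rw [A_inv wc wc.length le_rfl j, B_char wc false j]
  congr 1
  simp only [eq_iff_iff]
  constructor
  · rintro (⟨h1,_⟩|⟨h1,h2,h3,_⟩)
    · exact Or.inl h1
    · exact Or.inr ⟨h1, Or.inr ⟨h2, h3⟩⟩
  · rintro (h|⟨h1,h2⟩)
    · exact Or.inl ⟨h, lt_of_some h⟩
    · rcases h2 with ⟨_, hp⟩ | ⟨hk, hg⟩
      · exact absurd hp (by simp)
      · refine Or.inr ⟨h1, hk, hg, ?_⟩
        have := lt_of_some h1
        omega
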